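-- pv_equiv track=rewrite | github.com/efrentangente-cyber/ci-staff-app | ocr_service.py | _extract_assets
-- ===== SOURCE A (Python) =====
-- def _extract_assets(text, lines):
--     """Extract assets information"""
--     assets = []
--
--     in_asset_section = False
--     for i, line in enumerate(lines):
--         if 'asset' in line.lower():
--             in_asset_section = True
--
--         if in_asset_section:
--             if line.strip() and not 'liabilit' in line.lower():
--                 assets.append(line.strip())
--
--             if 'liabilit' in line.lower():
--                 break
--
--     return assets
-- ===== SOURCE B (Python) =====
-- def _extract_assets(text, lines):
--     """Extract assets information"""
--     lows = [l.lower() for l in lines]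
--     start = None
--     for i, low in enumerate(lows):
--         if 'asset' in low:
--             start = i
--             break
--     if start is None:
--         return []
--     end = len(lines)
--     for j in range(start, len(lines)):
--         if 'liabilit' in lows[j]:
--             end = j
--             break
--     stripped = [l.strip() for l in lines[start:end]]
--     return [s for s in stripped if s]
-- ===== Notes on version B (the rewrite author's own statement) =====
-- stated objective: alternative
-- what changed: Instead of a one-pass state machine with a mutable in_asset_section flag, B first precomputes the lowercased lines, computes the start index (first 'asset' line) and end index (first 'liabilit' line at or after start) as explicit boundary indices, then slices lines[start:end] and strips/filters the slice in separate staged passes.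
import Mathlib
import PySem

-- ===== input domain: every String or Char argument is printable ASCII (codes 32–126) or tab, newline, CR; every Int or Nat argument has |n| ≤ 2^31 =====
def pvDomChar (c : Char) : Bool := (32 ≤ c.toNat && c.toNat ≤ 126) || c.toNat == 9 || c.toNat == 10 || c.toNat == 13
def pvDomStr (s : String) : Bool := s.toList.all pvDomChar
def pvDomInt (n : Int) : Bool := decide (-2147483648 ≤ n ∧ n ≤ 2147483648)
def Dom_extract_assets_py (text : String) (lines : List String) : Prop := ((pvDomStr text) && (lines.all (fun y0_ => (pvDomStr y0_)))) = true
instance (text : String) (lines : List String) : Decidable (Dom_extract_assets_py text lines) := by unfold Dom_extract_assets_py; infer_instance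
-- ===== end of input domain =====

-- B replaces A's one-pass mutable-flag state machine by staged passes: precompute
-- lowercased lines, compute explicit start/end boundary indices, slice, strip, filter
-- (objective: alternative); the return values agree on all inputs.

-- ===== PORT A =====
-- A's single for-loop: state = (in_asset_section, assets)
def pvLoopA : List String → Bool → List String → List String
  | [], _, assets => assets
  | line :: rest, flag, assets =>
    let flag := if PySem.Str.isIn "asset" (PySem.Str.lower line) then true else flag
    if flag then
      let assets :=
        if PySem.Str.strip line ≠ "" ∧
           ¬ PySem.Str.isIn "liabilit" (PySem.Str.lower line) = true then
          assets ++ [PySem.Str.strip line]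
        else assets
      if PySem.Str.isIn "liabilit" (PySem.Str.lower line) then assets
      else pvLoopA rest flag assets
    else pvLoopA rest flag assets

def extract_assets_py (text : String) (lines : List String) : List String :=
  pvLoopA lines false []

-- ===== PORT B =====
-- B's first loop: index (into lows, from i) of the first line containing 'asset', else None
def pvFindStart : List String → Nat → Option Nat
  | [], _ => none
  | low :: rest, i =>
    if PySem.Str.isIn "asset" low then some i else pvFindStart rest (i + 1)

-- B's second loop: first j in range(j0, len lows) with 'liabilit' in lows[j], else len lows
def pvFindEnd (lows : List String) (j : Nat) : Nat :=
  if _h : j < lows.length then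
    if PySem.Str.isIn "liabilit" (lows.getD j "") then j else pvFindEnd lows (j + 1)
  else lows.length
  termination_by lows.length - j

def extract_assets_py_alt (text : String) (lines : List String) : List String :=
  let lows := lines.map PySem.Str.lower
  match pvFindStart lows 0 with
  | none => []
  | some s =>
    let e := pvFindEnd lows s
    ((PySem.List.slice lines (some (s : Int)) (some (e : Int))).map PySem.Str.strip).filter
      (fun x => x ≠ "")

-- ===== PRECONDITION & SPEC =====
def Spec_extract_assets_py (text : String) (lines : List String) (out : List String) : Prop := out = extract_assets_py_alt text lines
instance (text : String) (lines : List String) (out : List String) : Decidable (Spec_extract_assets_py text lines out) := by unfold Spec_extract_assets_py; infer_instance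

-- ===== CLAIM (what is proved, stated in full; the proofs are below) =====
def Claim_equal_extract_assets_py : Prop := ∀ (text : String) (lines : List String), Dom_extract_assets_py text lines → Spec_extract_assets_py text lines (extract_assets_py text lines)

-- ===== LEMMAS AND PROOFS =====

-- the common middle form both sides are reduced to
def pvSection (lines : List String) : List String :=
  (((lines.dropWhile (fun l => !PySem.Str.isIn "asset" (PySem.Str.lower l))).takeWhile
      (fun l => !PySem.Str.isIn "liabilit" (PySem.Str.lower l))).map PySem.Str.strip).filter
    (fun s => s ≠ "")

-- A-side: once the flag is true, A collects stripped non-blank lines up to the first 'liabilit' line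
lemma pvLoopA_true (ls : List String) (acc : List String) :
    pvLoopA ls true acc =
      acc ++ ((ls.takeWhile (fun l => !PySem.Str.isIn "liabilit" (PySem.Str.lower l))).map
        PySem.Str.strip).filter (fun s => s ≠ "") := by
  induction ls generalizing acc with
  | nil => simp [pvLoopA]
  | cons line rest ih =>
    by_cases hl : PySem.Str.isIn "liabilit" (PySem.Str.lower line) = true
    all_goals simp at hl
    · simp [pvLoopA, hl]
    · by_cases hs : PySem.Str.strip line ≠ ""
      · simp [pvLoopA, hl, hs, ih]
      · simp [pvLoopA, hl, ih, not_not.mp hs]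

-- A-side: while the flag is false, A skips exactly the lines without 'asset'
lemma pvLoopA_false (ls : List String) :
    pvLoopA ls false [] =
      pvLoopA (ls.dropWhile (fun l => !PySem.Str.isIn "asset" (PySem.Str.lower l))) true [] := by
  induction ls with
  | nil => simp [pvLoopA]
  | cons line rest ih =>
    by_cases ha : PySem.Str.isIn "asset" (PySem.Str.lower line) = true
    all_goals simp at ha
    · simp [ha, pvLoopA]
    · simp [ha, pvLoopA, ih]

lemma pvA_eq_section (lines : List String) :
    extract_assets_py "" lines = pvSection lines := by
  simp [extract_assets_py, pvSection, pvLoopA_false, pvLoopA_true]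

-- B-side: for j ≤ len, the end loop returns j + length of the liabilit-free prefix from j
lemma pvFindEnd_spec (lows : List String) (j : Nat) (hj : j ≤ lows.length) :
    pvFindEnd lows j =
      j + ((lows.drop j).takeWhile (fun l => !PySem.Str.isIn "liabilit" l)).length := by
  fun_induction pvFindEnd lows j with
  | case1 j h hl =>
    rw [List.drop_eq_getElem_cons h]
    simp only [List.getD, List.getElem?_eq_getElem h, Option.getD_some] at hl
    rw [List.takeWhile_cons, if_neg (by simp_all)]
    simp
  | case2 j h hl ih =>
    simp only [List.getD, List.getElem?_eq_getElem h, Option.getD_some] at hl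
    have hlf : PySem.Str.isIn "liabilit" lows[j] = false := by simpa using hl
    rw [ih (by omega), List.drop_eq_getElem_cons h, List.takeWhile_cons,
      if_pos (by simp_all)]
    simp only [List.length_cons]
    omega
  | case3 j h =>
    have hje : j = lows.length := by omega
    subst hje
    simp

-- B-side: result of the start loop, as takeWhile/dropWhile of its input
lemma pvFindStart_none (l : List String) (i : Nat)
    (h : pvFindStart l i = none) :
    l.dropWhile (fun low => !PySem.Str.isIn "asset" low) = [] := by
  induction l generalizing i with
  | nil => simp
  | cons x rest ih =>
    by_cases hx : PySem.Str.isIn "asset" x = true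
    · rw [pvFindStart, if_pos hx] at h; cases h
    · rw [pvFindStart, if_neg hx] at h
      have hxf : PySem.Str.isIn "asset" x = false := by simpa using hx
      rw [List.dropWhile_cons, if_pos (by simp_all)]
      exact ih _ h

lemma pvFindStart_some (l : List String) (i s : Nat)
    (h : pvFindStart l i = some s) :
    s = i + (l.takeWhile (fun low => !PySem.Str.isIn "asset" low)).length ∧
      ¬ l.dropWhile (fun low => !PySem.Str.isIn "asset" low) = [] := by
  induction l generalizing i with
  | nil => cases h
  | cons x rest ih =>
    by_cases hx : PySem.Str.isIn "asset" x = true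
    · rw [pvFindStart, if_pos hx] at h
      obtain rfl : i = s := by simpa using h
      refine ⟨?_, ?_⟩
      · rw [List.takeWhile_cons, if_neg (by simp_all)]; simp
      · rw [List.dropWhile_cons, if_neg (by simp_all)]; simp
    · rw [pvFindStart, if_neg hx] at h
      have hxf : PySem.Str.isIn "asset" x = false := by simpa using hx
      obtain ⟨h1, h2⟩ := ih (i + 1) h
      refine ⟨?_, ?_⟩
      · rw [List.takeWhile_cons, if_pos (by simp_all)]
        simp only [List.length_cons]
        omega
      · rw [List.dropWhile_cons, if_pos (by simp_all)]
        exact h2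

-- taking (length of takeWhile on the mapped list) equals takeWhile of the composite predicate
lemma take_len_takeWhile_map {α β : Type} (f : α → β) (p : β → Bool) (l : List α) :
    l.take (((l.map f).takeWhile p).length) = l.takeWhile (fun x => p (f x)) := by
  induction l with
  | nil => simp
  | cons x rest ih =>
    by_cases hp : p (f x) = true
    · simp [List.takeWhile_cons, hp, ih]
    · simp at hp; simp [List.takeWhile_cons, hp]

-- dropping (length of takeWhile) is dropWhile
lemma drop_len_takeWhile {α : Type} (p : α → Bool) (l : List α) :
    l.drop ((l.takeWhile p).length) = l.dropWhile p := by
  induction l with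
  | nil => simp
  | cons x rest ih =>
    by_cases hp : p x = true
    · simp [List.takeWhile_cons, List.dropWhile_cons, hp, ih]
    · simp at hp; simp [List.takeWhile_cons, List.dropWhile_cons, hp]

lemma pvB_eq_section (lines : List String) :
    extract_assets_py_alt "" lines = pvSection lines := by
  unfold extract_assets_py_alt
  cases hfs : pvFindStart (lines.map PySem.Str.lower) 0 with
  | none =>
    simp only [hfs]
    have h := pvFindStart_none _ _ hfs
    rw [List.dropWhile_map] at h
    simp only [List.map_eq_nil_iff, Function.comp_def] at h
    unfold pvSection
    rw [h]
    simp
  | some s =>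
    simp only [hfs]
    obtain ⟨h1, h2⟩ := pvFindStart_some _ _ _ hfs
    simp only [Nat.zero_add] at h1
    have hslen' : s ≤ (lines.map PySem.Str.lower).length := by
      subst h1
      exact List.IsPrefix.length_le (List.takeWhile_prefix _)
    rw [pvFindEnd_spec _ _ hslen']
    rw [PySem.List.slice_natCast]
    have harg : s + ((((lines.map PySem.Str.lower).drop s).takeWhile
        (fun l => !PySem.Str.isIn "liabilit" l)).length) - s =
        (((lines.map PySem.Str.lower).drop s).takeWhile
          (fun l => !PySem.Str.isIn "liabilit" l)).length := by omega
    rw [harg]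
    have hdrop : lines.drop s =
        lines.dropWhile (fun x => !PySem.Str.isIn "asset" (PySem.Str.lower x)) := by
      subst h1
      rw [List.takeWhile_map, List.length_map]
      rw [drop_len_takeWhile]
      simp [Function.comp_def]
    have hmapdrop : (lines.map PySem.Str.lower).drop s = (lines.drop s).map PySem.Str.lower := by
      rw [List.map_drop]
    rw [hmapdrop, hdrop, take_len_takeWhile_map]
    simp [pvSection]

-- the text argument is unused by both ports
lemma pvA_text (text : String) (lines : List String) :
    extract_assets_py text lines = extract_assets_py "" lines := rfl
lemma pvB_text (text : String) (lines : List String) :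
    extract_assets_py_alt text lines = extract_assets_py_alt "" lines := rfl

-- ===== VERDICT (by name: the statement is the Claim_ definition above) =====
theorem extract_assets_py_spec : Claim_equal_extract_assets_py := by
  intro text lines _
  show extract_assets_py text lines = extract_assets_py_alt text lines
  rw [pvA_text, pvB_text, pvA_eq_section, pvB_eq_section]
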